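-- pv_equiv track=rewrite | github.com/sangngoc27042001/ass3 | initial/src/test lặt vặt.py | countingStar
-- ===== SOURCE A (Python) =====
-- def countingStar(matrix):
--     n = len(matrix)
--     m = len(matrix[0])
--     count = 0
--     bo = False
--     for i in range(n):
--         for j in range(m):
--             if matrix[i][j]==0:
--                 bo = re(i,j,matrix,bo)
--             if bo:
--                 count+=1
--                 bo = False
--     return count
--
-- def re(a,b,matrix,bo):
--     n = len(matrix)
--     m = len(matrix[0])
--     if matrix[a][b]==0:
--         matrix[a][b] = -1
--         bo = True
--     for i in range(n):
--         for j in range(m):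
--             if ((abs(a-i)==1 and b==j) or (abs(b-j)==1 and a==i)) and matrix[i][j]==0:
--                 bo = re(i,j,matrix,bo)
--     return bo
-- ===== SOURCE B (Python) =====
-- def countingStar(matrix):
--     n = len(matrix)
--     m = len(matrix[0])
--     count = 0
--     for i in range(n):
--         for j in range(m):
--             if matrix[i][j] == 0:
--                 fill(i, j, matrix)
--                 count += 1
--     return count
--
-- def fill(i, j, matrix):
--     n = len(matrix)
--     m = len(matrix[0])
--     if 0 <= i < n and 0 <= j < m and matrix[i][j] == 0:
--         matrix[i][j] = -1
--         fill(i - 1, j, matrix)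
--         fill(i, j - 1, matrix)
--         fill(i, j + 1, matrix)
--         fill(i + 1, j, matrix)
-- ===== Notes on version B (the rewrite author's own statement) =====
-- stated objective: faster
-- what changed: Replaces A's flood step that rescans the whole n*m matrix on every recursive call with a flood fill that recurses directly into the 4 bounds-checked neighbours, and drops the bo-flag bookkeeping (count is incremented directly when an unvisited zero cell is found).
import Mathlib
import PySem

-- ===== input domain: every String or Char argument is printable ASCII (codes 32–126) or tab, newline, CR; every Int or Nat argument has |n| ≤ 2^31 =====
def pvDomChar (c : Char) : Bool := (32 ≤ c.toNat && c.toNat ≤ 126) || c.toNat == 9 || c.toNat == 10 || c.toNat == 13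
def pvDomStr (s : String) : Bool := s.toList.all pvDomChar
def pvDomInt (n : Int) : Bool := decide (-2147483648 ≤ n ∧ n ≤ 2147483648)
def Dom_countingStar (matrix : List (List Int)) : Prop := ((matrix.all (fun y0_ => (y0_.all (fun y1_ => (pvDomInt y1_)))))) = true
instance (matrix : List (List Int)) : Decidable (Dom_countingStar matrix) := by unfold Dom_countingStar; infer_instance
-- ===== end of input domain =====

-- B replaces A's per-call whole-matrix rescan by a direct 4-neighbour flood fill (measured asymptotically faster);
-- both Pythons mutate `matrix` in place identically, the theorem is about the return value.


-- ===== PORT A =====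
-- matrix[i][j] as an Option: `none` exactly where Python raises IndexError (never reached
-- at the sites below on inputs admitted by Pre_).
def pvGet2 (M : List (List Int)) (i j : Int) : Option Int :=
  (PySem.List.pyGet? M i).bind (fun row => PySem.List.pyGet? row j)

-- matrix[i][j] = v (indices are always canonical non-negative in-range at the call sites)
def pvSet2 (M : List (List Int)) (i j : Int) (v : Int) : List (List Int) :=
  PySem.List.pySetD M i (PySem.List.pySetD (PySem.List.pyGetD M i []) j v)

-- helper `re(a, b, matrix, bo)` of A, with fuel making the recursion structural
-- (fuel n*m+1 from the entry point is more than the recursion depth, which is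
-- bounded by the number of zero cells: each call consuming fuel marks a fresh zero cell).
def pvReA : Nat → Int → Int → List (List Int) → Bool → Bool × List (List Int)
  | 0, _, _, M, bo => (bo, M)
  | f + 1, a, b, M, bo =>
    let n : Int := M.length
    let m : Int := (PySem.List.pyGetD M 0 []).length
    let s0 : Bool × List (List Int) :=
      if pvGet2 M a b = some 0 then (true, pvSet2 M a b (-1)) else (bo, M)
    (PySem.List.pyRange 0 n 1).foldl (fun s i =>
      (PySem.List.pyRange 0 m 1).foldl (fun s j =>
        if ((a - i).natAbs = 1 ∧ b = j ∨ (b - j).natAbs = 1 ∧ a = i) ∧ pvGet2 s.2 i j = some 0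
        then pvReA f i j s.2 s.1 else s) s) s0

def countingStar (matrix : List (List Int)) : Int :=
  let n : Int := matrix.length
  let m : Int := (PySem.List.pyGetD matrix 0 []).length
  let F : Nat := matrix.length * (PySem.List.pyGetD matrix 0 []).length + 1
  ((PySem.List.pyRange 0 n 1).foldl (fun s i =>
    (PySem.List.pyRange 0 m 1).foldl (fun s j =>
      let bm : Bool × List (List Int) :=
        if pvGet2 s.2.2 i j = some 0 then pvReA F i j s.2.2 s.2.1 else (s.2.1, s.2.2)
      if bm.1 then (s.1 + 1, false, bm.2) else (s.1, bm.1, bm.2)) s) ((0 : Int), false, matrix)).1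

-- ===== PORT B =====
-- helper `fill(i, j, matrix)` of B: direct 4-neighbour flood fill (same fuel bound as A's port)
def pvFillB : Nat → Int → Int → List (List Int) → List (List Int)
  | 0, _, _, M => M
  | f + 1, i, j, M =>
    let n : Int := M.length
    let m : Int := (PySem.List.pyGetD M 0 []).length
    if 0 ≤ i ∧ i < n ∧ 0 ≤ j ∧ j < m ∧ pvGet2 M i j = some 0 then
      let M1 := pvSet2 M i j (-1)
      let M2 := pvFillB f (i - 1) j M1
      let M3 := pvFillB f i (j - 1) M2
      let M4 := pvFillB f i (j + 1) M3
      pvFillB f (i + 1) j M4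
    else M

def countingStar_alt (matrix : List (List Int)) : Int :=
  let n : Int := matrix.length
  let m : Int := (PySem.List.pyGetD matrix 0 []).length
  let F : Nat := matrix.length * (PySem.List.pyGetD matrix 0 []).length + 1
  ((PySem.List.pyRange 0 n 1).foldl (fun s i =>
    (PySem.List.pyRange 0 m 1).foldl (fun s j =>
      if pvGet2 s.2 i j = some 0 then (s.1 + 1, pvFillB F i j s.2) else s) s) ((0 : Int), matrix)).1

-- ===== PRECONDITION & SPEC =====
-- Pre_ excludes exactly the inputs on which Python A raises IndexError: the empty matrix
-- (matrix[0]) and matrices with a row shorter than row 0 (the outer loop reads matrix[i][j]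
-- for every j < len(matrix[0])).  B raises on exactly the same inputs.
def Pre_countingStar (matrix : List (List Int)) : Prop :=
  matrix ≠ [] ∧ ∀ row ∈ matrix, (matrix.headD []).length ≤ row.length
instance (matrix : List (List Int)) : Decidable (Pre_countingStar matrix) := by
  unfold Pre_countingStar; infer_instance

def pvWitness_countingStar : List (List Int) := [[0, 1, 0], [0, 0, 3]]

def Spec_countingStar (matrix : List (List Int)) (out : Int) : Prop := out = countingStar_alt matrix
instance (matrix : List (List Int)) (out : Int) : Decidable (Spec_countingStar matrix out) := by
  unfold Spec_countingStar; infer_instance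

-- ===== CLAIM (what is proved, stated in full; the proofs are below) =====
def Claim_equal_countingStar : Prop := ∀ (matrix : List (List Int)), Dom_countingStar matrix → Pre_countingStar matrix → Spec_countingStar matrix (countingStar matrix)

-- ===== LEMMAS AND PROOFS =====

-- proof-only helpers -----------------------------------------------------------

-- the four 4-adjacency neighbours of (a,b), in the row-major order A's scan finds them
def pvNbrs (a b : Int) : List (Int × Int) := [(a - 1, b), (a, b - 1), (a, b + 1), (a + 1, b)]

-- A's neighbour condition on a cell, as a predicate on the pair
abbrev pvNbProp (a b : Int) (p : Int × Int) : Prop :=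
  (a - p.1).natAbs = 1 ∧ b = p.2 ∨ (b - p.2).natAbs = 1 ∧ a = p.1

-- in-bounds condition for an n × m grid
abbrev pvInb (n m : Int) (p : Int × Int) : Prop := 0 ≤ p.1 ∧ p.1 < n ∧ 0 ≤ p.2 ∧ p.2 < m

-- row-major (lexicographic) strict order on cells
abbrev pvLex (p q : Int × Int) : Prop := p.1 < q.1 ∨ (p.1 = q.1 ∧ p.2 < q.2)

-- generic fold lemmas ----------------------------------------------------------

lemma pvFoldlInv {α β : Type} (g : β → α → β) (I : β → Prop)
    (hg : ∀ s x, I s → I (g s x)) : ∀ (l : List α) (s : β), I s → I (l.foldl g s) := by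
  intro l
  induction l with
  | nil => intro s hs; exact hs
  | cons x t ih => intro s hs; exact ih (g s x) (hg s x hs)

lemma pvFoldlFoldlProduct {β : Type} (g : β → Int → Int → β) (l₂ : List Int) :
    ∀ (l₁ : List Int) (s : β),
      l₁.foldl (fun s i => l₂.foldl (fun s j => g s i j) s) s
        = (l₁ ×ˢ l₂).foldl (fun s p => g s p.1 p.2) s := by
  intro l₁
  induction l₁ with
  | nil => intro s; rfl
  | cons a t ih =>
      intro s
      simp only [List.foldl_cons, List.product_cons, List.foldl_append, List.foldl_map, ih]

lemma pvFoldlGuardFilter {α β : Type} (p : α → Prop) [DecidablePred p] (g : β → α → β) :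
    ∀ (l : List α) (s : β),
      l.foldl (fun s x => if p x then g s x else s) s
        = (l.filter (fun x => decide (p x))).foldl g s := by
  intro l
  induction l with
  | nil => intro s; rfl
  | cons x t ih =>
      intro s
      by_cases h : p x <;> simp [h, ih]

-- shape preservation -----------------------------------------------------------

lemma pvWidth_eq_shape (M : List (List Int)) :
    (PySem.List.pyGetD M 0 []).length = (M.map List.length).headD 0 := by
  rw [PySem.List.pyGetD_zero]
  cases M <;> rfl

lemma pvShape_pvSet2 (M : List (List Int)) (i j v : Int) (hi : 0 ≤ i) :
    (pvSet2 M i j v).map List.length = M.map List.length := by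
  unfold pvSet2
  rw [PySem.List.pySetD_of_nonneg M _ hi]
  by_cases h : i.toNat < M.length
  · rw [List.map_set]
    have hg : PySem.List.pyGetD M i [] = M[i.toNat] :=
      PySem.List.pyGetD_eq_getElem M [] hi (by omega)
    rw [PySem.List.length_pySetD, hg]
    have : List.length (M[i.toNat]) = (M.map List.length)[i.toNat]'(by simpa using h) := by simp
    rw [this, List.set_getElem_self]
  · rw [List.set_eq_of_length_le (by omega)]

lemma pvFillB_succ_eq (f : Nat) (i j : Int) (M : List (List Int)) :
    pvFillB (f + 1) i j M
      = if 0 ≤ i ∧ i < (M.length : Int) ∧ 0 ≤ j ∧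
            j < ((PySem.List.pyGetD M 0 []).length : Int) ∧ pvGet2 M i j = some 0 then
          pvFillB f (i + 1) j (pvFillB f i (j + 1) (pvFillB f i (j - 1)
            (pvFillB f (i - 1) j (pvSet2 M i j (-1)))))
        else M := rfl

lemma pvShape_pvFillB : ∀ (f : Nat) (i j : Int) (M : List (List Int)),
    (pvFillB f i j M).map List.length = M.map List.length := by
  intro f
  induction f with
  | zero => intro i j M; rfl
  | succ f ih =>
      intro i j M
      rw [pvFillB_succ_eq]
      split
      next h =>
        rw [ih, ih, ih, ih, pvShape_pvSet2 M i j (-1) h.1]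
      next => rfl

lemma pvLen_pvFillB (f : Nat) (i j : Int) (M : List (List Int)) :
    (pvFillB f i j M).length = M.length := by
  have := congrArg List.length (pvShape_pvFillB f i j M); simpa using this

lemma pvWidth_pvFillB (f : Nat) (i j : Int) (M : List (List Int)) :
    (PySem.List.pyGetD (pvFillB f i j M) 0 []).length = (PySem.List.pyGetD M 0 []).length := by
  rw [pvWidth_eq_shape, pvWidth_eq_shape, pvShape_pvFillB]

-- B's fill is a no-op when its guard fails
lemma pvFillB_nop (f : Nat) (i j : Int) (M : List (List Int))
    (h : ¬ (0 ≤ i ∧ i < (M.length : Int) ∧ 0 ≤ j ∧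
            j < ((PySem.List.pyGetD M 0 []).length : Int) ∧ pvGet2 M i j = some 0)) :
    pvFillB f i j M = M := by
  cases f with
  | zero => rfl
  | succ f => rw [pvFillB_succ_eq, if_neg h]

-- B's fill, written as a fold over the neighbour list (matches the four sequential calls)
lemma pvFillB_succ_fold (f : Nat) (i j : Int) (M : List (List Int))
    (h : 0 ≤ i ∧ i < (M.length : Int) ∧ 0 ≤ j ∧
         j < ((PySem.List.pyGetD M 0 []).length : Int) ∧ pvGet2 M i j = some 0) :
    pvFillB (f + 1) i j M
      = (pvNbrs i j).foldl (fun M p => pvFillB f p.1 p.2 M) (pvSet2 M i j (-1)) := by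
  rw [pvFillB_succ_eq, if_pos h]
  simp only [pvNbrs, List.foldl_cons, List.foldl_nil]

-- dropping out-of-bounds cells from a fold of fills changes nothing
lemma pvFoldFillFilter (f : Nat) (n m : Int) :
    ∀ (l : List (Int × Int)) (M : List (List Int)),
      (M.length : Int) = n → ((PySem.List.pyGetD M 0 []).length : Int) = m →
      l.foldl (fun M p => pvFillB f p.1 p.2 M) M
        = (l.filter (fun p => decide (pvInb n m p))).foldl (fun M p => pvFillB f p.1 p.2 M) M := by
  intro l
  induction l with
  | nil => intro M _ _; rfl
  | cons p t ih =>
      intro M hn hm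
      by_cases h : pvInb n m p
      · simp only [List.foldl_cons, List.filter_cons, decide_eq_true h, if_pos]
        exact ih _ (by rw [pvLen_pvFillB]; exact hn) (by rw [pvWidth_pvFillB]; exact hm)
      · have hid : pvFillB f p.1 p.2 M = M := by
          apply pvFillB_nop
          intro hc
          exact h ⟨hc.1, by omega, hc.2.2.1, by omega⟩
        simp only [List.foldl_cons, List.filter_cons, decide_eq_false h, hid]
        exact ih M hn hm

-- the neighbour scan: A's filtered whole-matrix scan hits exactly the in-bounds neighbours
lemma pvMemNbrs (a b : Int) (p : Int × Int) : p ∈ pvNbrs a b ↔ pvNbProp a b p := by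
  obtain ⟨i, j⟩ := p
  simp only [pvNbrs, pvNbProp, List.mem_cons, List.not_mem_nil, or_false, Prod.mk.injEq]
  omega

lemma pvPairwiseLexProduct (l₂ : List Int) (h₂ : l₂.Pairwise (· < ·)) :
    ∀ (l₁ : List Int), l₁.Pairwise (· < ·) → (l₁ ×ˢ l₂).Pairwise pvLex := by
  intro l₁
  induction l₁ with
  | nil => intro _; simp
  | cons a t ih =>
      intro h₁
      rw [List.product_cons, List.pairwise_append]
      refine ⟨?_, ih (List.Pairwise.sublist (List.sublist_cons_self a t) h₁), ?_⟩
      · exact List.Pairwise.map _ (fun x y hxy => Or.inr ⟨rfl, hxy⟩) h₂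
      · intro u hu w hw
        obtain ⟨x, _, rfl⟩ := List.mem_map.mp hu
        obtain ⟨w1, w2⟩ := w
        have hw1 : w1 ∈ t := (List.mem_product.mp hw).1
        exact Or.inl ((List.pairwise_cons.mp h₁).1 w1 hw1)

lemma pvFilterProdEqNbrs (n m a b : Int) :
    ((PySem.List.pyRange 0 n 1) ×ˢ (PySem.List.pyRange 0 m 1)).filter
        (fun p => decide (pvNbProp a b p))
      = (pvNbrs a b).filter (fun p => decide (pvInb n m p)) := by
  have hr1 : (PySem.List.pyRange 0 n 1).Pairwise (· < ·) := PySem.List.pairwise_lt_pyRange_one 0 n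
  have hr2 : (PySem.List.pyRange 0 m 1).Pairwise (· < ·) := PySem.List.pairwise_lt_pyRange_one 0 m
  have hpw1 : (((PySem.List.pyRange 0 n 1) ×ˢ (PySem.List.pyRange 0 m 1)).filter
      (fun p => decide (pvNbProp a b p))).Pairwise pvLex :=
    List.Pairwise.filter _ (pvPairwiseLexProduct _ hr2 _ hr1)
  have hnbrs : (pvNbrs a b).Pairwise pvLex := by
    simp only [pvNbrs, pvLex, List.pairwise_cons, List.mem_cons, List.not_mem_nil, or_false,
      List.Pairwise.nil, and_true]
    refine ⟨?_, ?_, ?_, fun q h => absurd h (by simp)⟩ <;>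
      (rintro q (rfl | rfl | rfl | rfl) <;> simp)
  have hpw2 : ((pvNbrs a b).filter (fun p => decide (pvInb n m p))).Pairwise pvLex :=
    List.Pairwise.filter _ hnbrs
  have hnd1 : (((PySem.List.pyRange 0 n 1) ×ˢ (PySem.List.pyRange 0 m 1)).filter
      (fun p => decide (pvNbProp a b p))).Nodup :=
    List.Nodup.filter _ (List.Nodup.product (PySem.List.nodup_pyRange_one 0 n)
      (PySem.List.nodup_pyRange_one 0 m))
  have hnd2 : ((pvNbrs a b).filter (fun p => decide (pvInb n m p))).Nodup :=
    List.Nodup.filter _ (hnbrs.imp (fun h => by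
      intro heq; subst heq; unfold pvLex at h; omega))
  have hperm := List.perm_of_nodup_nodup_toFinset_eq hnd1 hnd2 (by
    apply Finset.ext
    rintro ⟨p1, p2⟩
    simp only [List.mem_toFinset, List.mem_filter, List.mem_product,
      PySem.List.mem_pyRange_one, pvMemNbrs, decide_eq_true_eq]
    constructor
    · rintro ⟨⟨⟨h1, h2⟩, h3, h4⟩, h5⟩
      exact ⟨h5, h1, h2, h3, h4⟩
    · rintro ⟨h5, h1, h2, h3, h4⟩
      exact ⟨⟨⟨h1, h2⟩, h3, h4⟩, h5⟩)
  exact @List.Perm.eq_of_pairwise' _ pvLex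
    ⟨fun a b h1 h2 => by unfold pvLex at h1 h2; exact Prod.ext_iff.mpr ⟨by omega, by omega⟩⟩
    _ _ hpw1 hpw2 hperm

-- bo bookkeeping in A ----------------------------------------------------------

lemma pvReA_bo_keep : ∀ (f : Nat) (a b : Int) (M : List (List Int)),
    (pvReA f a b M true).1 = true := by
  intro f
  induction f with
  | zero => intro a b M; rfl
  | succ f ih =>
      intro a b M
      show (pvReA (f + 1) a b M true).1 = true
      unfold pvReA
      apply pvFoldlInv _ (fun s : Bool × List (List Int) => s.1 = true)
      · intro s i hs
        apply pvFoldlInv _ (fun s : Bool × List (List Int) => s.1 = true)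
        · intro s j hs
          dsimp only
          split
          · rw [hs]; exact ih _ _ _
          · exact hs
        · exact hs
      · split <;> rfl

lemma pvReA_bo_true (f : Nat) (a b : Int) (M : List (List Int)) (bo : Bool)
    (h : pvGet2 M a b = some 0) : (pvReA (f + 1) a b M bo).1 = true := by
  unfold pvReA
  apply pvFoldlInv _ (fun s : Bool × List (List Int) => s.1 = true)
  · intro s i hs
    apply pvFoldlInv _ (fun s : Bool × List (List Int) => s.1 = true)
    · intro s j hs
      dsimp only
      split
      · rw [hs]; exact pvReA_bo_keep f _ _ _
      · exact hs
    · exact hs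
  · rw [if_pos h]

-- the heart: A's `re` and B's `fill` produce the same matrix ---------------------

lemma pvReFill : ∀ (f : Nat) (a b : Int) (M : List (List Int)) (bo : Bool),
    0 ≤ a → a < (M.length : Int) → 0 ≤ b → b < ((PySem.List.pyGetD M 0 []).length : Int) →
    pvGet2 M a b = some 0 →
    (pvReA f a b M bo).2 = pvFillB f a b M := by
  intro f
  induction f with
  | zero => intro a b M bo _ _ _ _ _; rfl
  | succ f ih =>
      intro a b M bo ha0 han hb0 hbm hz
      -- the fold correspondence at fuel f, over any list of in-bounds cells
      have foldAB : ∀ (l : List (Int × Int)) (bo : Bool) (M' : List (List Int)),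
          (∀ p ∈ l, pvInb (M'.length : Int) ((PySem.List.pyGetD M' 0 []).length : Int) p) →
          (l.foldl (fun s p =>
              if pvGet2 s.2 p.1 p.2 = some 0 then pvReA f p.1 p.2 s.2 s.1 else s) (bo, M')).2
            = l.foldl (fun M p => pvFillB f p.1 p.2 M) M' := by
        intro l
        induction l with
        | nil => intro bo M' _; rfl
        | cons p t iht =>
            intro bo M' hmem
            obtain ⟨hp1, hp2, hp3, hp4⟩ := hmem p (List.mem_cons_self ..)
            by_cases hz' : pvGet2 M' p.1 p.2 = some 0
            · have hM : (pvReA f p.1 p.2 M' bo).2 = pvFillB f p.1 p.2 M' :=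
                ih p.1 p.2 M' bo hp1 hp2 hp3 hp4 hz'
              have heta : pvReA f p.1 p.2 M' bo
                  = ((pvReA f p.1 p.2 M' bo).1, pvFillB f p.1 p.2 M') :=
                Prod.ext rfl hM
              rw [List.foldl_cons, List.foldl_cons]
              dsimp only
              rw [if_pos hz', heta]
              apply iht
              intro q hq
              obtain ⟨q1, q2, q3, q4⟩ := hmem q (List.mem_cons_of_mem _ hq)
              refine ⟨q1, ?_, q3, ?_⟩
              · rw [pvLen_pvFillB]; exact q2
              · rw [pvWidth_pvFillB]; exact q4
            · have hid : pvFillB f p.1 p.2 M' = M' := by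
                apply pvFillB_nop
                intro hc
                exact hz' hc.2.2.2.2
              rw [List.foldl_cons, List.foldl_cons]
              dsimp only
              rw [if_neg hz', hid]
              exact iht bo M' (fun q hq => hmem q (List.mem_cons_of_mem _ hq))
      -- names for this grid's dimensions
      set n : Int := (M.length : Int) with hn
      set m : Int := ((PySem.List.pyGetD M 0 []).length : Int) with hm
      -- unfold A one step
      show ((PySem.List.pyRange 0 n 1).foldl (fun s i =>
          (PySem.List.pyRange 0 m 1).foldl (fun s j =>
            if ((a - i).natAbs = 1 ∧ b = j ∨ (b - j).natAbs = 1 ∧ a = i) ∧ pvGet2 s.2 i j = some 0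
            then pvReA f i j s.2 s.1 else s) s)
          (if pvGet2 M a b = some 0 then (true, pvSet2 M a b (-1)) else (bo, M))).2
        = pvFillB (f + 1) a b M
      rw [if_pos hz, pvFillB_succ_fold f a b M ⟨ha0, han, hb0, hbm, hz⟩]
      -- flatten A's nested scan into a fold over the product, split off the neighbour filter
      rw [pvFoldlFoldlProduct (fun s i j =>
        if ((a - i).natAbs = 1 ∧ b = j ∨ (b - j).natAbs = 1 ∧ a = i) ∧ pvGet2 s.2 i j = some 0
        then pvReA f i j s.2 s.1 else s) (PySem.List.pyRange 0 m 1) (PySem.List.pyRange 0 n 1)]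
      have hsplit : ∀ (s : Bool × List (List Int)) (p : Int × Int),
          (if ((a - p.1).natAbs = 1 ∧ b = p.2 ∨ (b - p.2).natAbs = 1 ∧ a = p.1)
              ∧ pvGet2 s.2 p.1 p.2 = some 0
           then pvReA f p.1 p.2 s.2 s.1 else s)
            = (if pvNbProp a b p then
                 (if pvGet2 s.2 p.1 p.2 = some 0 then pvReA f p.1 p.2 s.2 s.1 else s)
               else s) := by
        intro s p
        unfold pvNbProp
        split_ifs with h1 h2 h3 <;> first | rfl | (exfalso; tauto)
      have h1 : List.foldl (fun (s : Bool × List (List Int)) (p : Int × Int) =>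
            if ((a - p.1).natAbs = 1 ∧ b = p.2 ∨ (b - p.2).natAbs = 1 ∧ a = p.1)
                ∧ pvGet2 s.2 p.1 p.2 = some 0
            then pvReA f p.1 p.2 s.2 s.1 else s) (true, pvSet2 M a b (-1))
            ((PySem.List.pyRange 0 n 1) ×ˢ (PySem.List.pyRange 0 m 1))
          = List.foldl (fun (s : Bool × List (List Int)) (p : Int × Int) =>
              if pvNbProp a b p then
                (if pvGet2 s.2 p.1 p.2 = some 0 then pvReA f p.1 p.2 s.2 s.1 else s)
              else s) (true, pvSet2 M a b (-1))
            ((PySem.List.pyRange 0 n 1) ×ˢ (PySem.List.pyRange 0 m 1)) :=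
        PySem.List.foldl_congr_mem _ _ _ _ (fun acc p _ => hsplit acc p)
      rw [h1]
      rw [pvFoldlGuardFilter (pvNbProp a b)
        (fun s p => if pvGet2 s.2 p.1 p.2 = some 0 then pvReA f p.1 p.2 s.2 s.1 else s)]
      rw [pvFilterProdEqNbrs n m a b]
      -- shape of the marked matrix
      have hshape := pvShape_pvSet2 M a b (-1) ha0
      have hlen : ((pvSet2 M a b (-1)).length : Int) = n := by
        have := congrArg List.length hshape; simpa [hn] using this
      have hwid : (((PySem.List.pyGetD (pvSet2 M a b (-1)) 0 []).length : Int)) = m := by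
        rw [pvWidth_eq_shape, hshape, ← pvWidth_eq_shape, hm]
      -- drop the out-of-bounds neighbours from B's side too, then relate pointwise
      rw [pvFoldFillFilter f n m (pvNbrs a b) (pvSet2 M a b (-1)) hlen hwid]
      apply foldAB
      intro q hq
      have := (List.mem_filter.mp hq).2
      have hq' : pvInb n m q := of_decide_eq_true this
      refine ⟨hq'.1, ?_, hq'.2.2.1, ?_⟩
      · rw [hlen]; exact hq'.2.1
      · rw [hwid]; exact hq'.2.2.2

-- the outer row-major counting loops agree -------------------------------------

lemma pvOuterFold (f : Nat) :
    ∀ (l : List (Int × Int)) (c : Int) (M : List (List Int)),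
      (∀ p ∈ l, pvInb (M.length : Int) ((PySem.List.pyGetD M 0 []).length : Int) p) →
      (l.foldl (fun s p =>
          let bm : Bool × List (List Int) :=
            if pvGet2 s.2.2 p.1 p.2 = some 0 then pvReA (f + 1) p.1 p.2 s.2.2 s.2.1
            else (s.2.1, s.2.2)
          if bm.1 then (s.1 + 1, false, bm.2) else (s.1, bm.1, bm.2)) (c, false, M)).1
        = (l.foldl (fun s p =>
            if pvGet2 s.2 p.1 p.2 = some 0 then (s.1 + 1, pvFillB (f + 1) p.1 p.2 s.2) else s)
            (c, M)).1 := by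
  intro l
  induction l with
  | nil => intro c M _; rfl
  | cons p t ih =>
      intro c M hmem
      obtain ⟨hp1, hp2, hp3, hp4⟩ := hmem p (List.mem_cons_self ..)
      by_cases hz : pvGet2 M p.1 p.2 = some 0
      · have hbo : (pvReA (f + 1) p.1 p.2 M false).1 = true := pvReA_bo_true f _ _ _ _ hz
        have hM : (pvReA (f + 1) p.1 p.2 M false).2 = pvFillB (f + 1) p.1 p.2 M :=
          pvReFill (f + 1) p.1 p.2 M false hp1 hp2 hp3 hp4 hz
        simp only [List.foldl_cons, if_pos hz, hbo, hM, if_pos]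
        apply ih
        intro q hq
        obtain ⟨q1, q2, q3, q4⟩ := hmem q (List.mem_cons_of_mem _ hq)
        refine ⟨q1, ?_, q3, ?_⟩
        · rw [pvLen_pvFillB]; exact q2
        · rw [pvWidth_pvFillB]; exact q4
      · simp only [List.foldl_cons, if_neg hz]
        exact ih c M (fun q hq => hmem q (List.mem_cons_of_mem _ hq))

-- ===== VERDICT (by name: the statement is the Claim_ definition above) =====
theorem countingStar_spec : Claim_equal_countingStar := by
  intro matrix _ _
  unfold Spec_countingStar countingStar countingStar_alt
  set n : Int := (matrix.length : Int) with hn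
  set m : Int := ((PySem.List.pyGetD matrix 0 []).length : Int) with hm
  set F : Nat := matrix.length * (PySem.List.pyGetD matrix 0 []).length + 1 with hF
  dsimp only
  rw [pvFoldlFoldlProduct (fun s i j =>
      let bm : Bool × List (List Int) :=
        if pvGet2 s.2.2 i j = some 0 then pvReA F i j s.2.2 s.2.1 else (s.2.1, s.2.2)
      if bm.1 then (s.1 + 1, false, bm.2) else (s.1, bm.1, bm.2))
    (PySem.List.pyRange 0 m 1) (PySem.List.pyRange 0 n 1)]
  rw [pvFoldlFoldlProduct (fun s i j =>
      if pvGet2 s.2 i j = some 0 then (s.1 + 1, pvFillB F i j s.2) else s)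
    (PySem.List.pyRange 0 m 1) (PySem.List.pyRange 0 n 1)]
  have hFs : F = (matrix.length * (PySem.List.pyGetD matrix 0 []).length) + 1 := hF
  rw [hFs]
  apply pvOuterFold (matrix.length * (PySem.List.pyGetD matrix 0 []).length)
  intro q hq
  obtain ⟨q1, q2⟩ := q
  rcases List.mem_product.mp hq with ⟨h1, h2⟩
  rcases (PySem.List.mem_pyRange_one).mp h1 with ⟨a1, a2⟩
  rcases (PySem.List.mem_pyRange_one).mp h2 with ⟨b1, b2⟩
  exact ⟨a1, a2, b1, b2⟩
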